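-- pv_equiv track=rewrite | github.com/FachiHD/TruthTableCreator | src/solver.py | check_surrounded
-- ===== SOURCE A (Python) =====
-- OPENING_BRACKET = "("
--
-- CLOSING_BRACKET = ")"
--
-- def check_surrounded(string):
--     """ Check if the string as a whole is surrounded by brackets
--
--     :param string: The string to check.
--     :return: True if it is surrounded.
--     """
--     length = len(string)
--     if length <= 1:
--         return False
--
--     counter = 0
--     for idx in range(length):
--         char = string[idx]
--         if char == OPENING_BRACKET:
--             counter += 1
--         elif char == CLOSING_BRACKET:
--             counter -= 1
--
--         # return the string if we exited all brackets but have not looped through the entire string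
--         # meaning there are no more brackets around the entire string
--         if counter == 0 and idx != length - 1:
--             return False
--     return True
-- ===== SOURCE B (Python) =====
-- def check_surrounded(string):
--     """ Check if the string as a whole is surrounded by brackets """
--     if len(string) <= 1:
--         return False
--     # brute force: at every proper cut point, recount brackets in the prefix
--     # independently; the string stays "inside brackets" at cut i exactly when
--     # the numbers of '(' and ')' seen so far differ.
--     return all(string[:i].count("(") != string[:i].count(")")
--                for i in range(1, len(string)))
-- ===== Notes on version B (the rewrite author's own statement) =====
-- stated objective: alternative
-- what changed: Replaced A's single left-to-right scan with a running counter and early return by a brute-force check that, for every proper cut point independently, recounts '(' and ')' in that prefix with str.count and requires the two counts to differ.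
import Mathlib
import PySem

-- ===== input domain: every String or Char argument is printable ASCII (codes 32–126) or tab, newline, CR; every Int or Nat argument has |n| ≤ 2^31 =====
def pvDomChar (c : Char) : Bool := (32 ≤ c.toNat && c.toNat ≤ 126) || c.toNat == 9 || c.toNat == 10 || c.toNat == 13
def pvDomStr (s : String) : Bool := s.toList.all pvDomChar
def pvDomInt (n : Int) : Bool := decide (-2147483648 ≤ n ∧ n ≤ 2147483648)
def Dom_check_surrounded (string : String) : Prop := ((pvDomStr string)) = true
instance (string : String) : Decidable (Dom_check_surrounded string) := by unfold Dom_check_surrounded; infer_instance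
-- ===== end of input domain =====

-- B replaces A's single running-counter scan by an independent bracket recount of every proper prefix (objective: alternative algorithm, quadratic but accumulator-free).

-- ===== PORT A =====
-- the for-loop of A: index idx, running counter, early False when the balance
-- closes before the last index
def check_surrounded_loop (length : Nat) : List Char → Nat → Int → Bool
  | [], _, _ => true
  | char :: rest, idx, counter =>
    let counter' := if char = '(' then counter + 1
                    else if char = ')' then counter - 1 else counter
    if counter' = 0 ∧ idx ≠ length - 1 then false
    else check_surrounded_loop length rest (idx + 1) counter'

def check_surrounded (string : String) : Bool :=
  let length := string.toList.length
  if length ≤ 1 then false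
  else check_surrounded_loop length string.toList 0 0

-- ===== PORT B =====
-- Source B: all(string[:i].count("(") != string[:i].count(")") for i in range(1, len(string)));
-- str.count of a single-character needle is exactly List.count of that character.
def check_surrounded_alt (string : String) : Bool :=
  let cs := string.toList
  if cs.length ≤ 1 then false
  else (PySem.List.pyRange 1 cs.length 1).all fun i =>
    decide (¬ ((PySem.List.slice cs none (some i)).count '('
              = (PySem.List.slice cs none (some i)).count ')'))

-- ===== PRECONDITION & SPEC =====
def Spec_check_surrounded (string : String) (out : Bool) : Prop := out = check_surrounded_alt string
instance (string : String) (out : Bool) : Decidable (Spec_check_surrounded string out) := by unfold Spec_check_surrounded; infer_instance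

-- ===== CLAIM (what is proved, stated in full; the proofs are below) =====
def Claim_equal_check_surrounded : Prop := ∀ (string : String), Dom_check_surrounded string → Spec_check_surrounded string (check_surrounded string)

-- ===== LEMMAS AND PROOFS =====

-- prefix balance of the first k characters, as B's counting view
def prefBal (cs : List Char) (k : Nat) : Int :=
  ((cs.take k).count '(' : Int) - ((cs.take k).count ')' : Int)

-- the running balances of cs starting from b, in order
def balList (bal : Int) : List Char → List Int
  | [] => []
  | char :: rest =>
    let bal' := if char = '(' then bal + 1
                else if char = ')' then bal - 1 else bal
    bal' :: balList bal' rest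

theorem prefBal_cons (c : Char) (rest : List Char) (k : Nat) :
    prefBal (c :: rest) (k + 1)
      = (if c = '(' then 1 else if c = ')' then -1 else 0) + prefBal rest k := by
  simp only [prefBal, List.take_succ_cons, List.count_cons, beq_iff_eq]
  by_cases h1 : c = '(' <;> by_cases h2 : c = ')' <;> simp [h1, h2] <;> ring

theorem balList_eq_map (cs : List Char) : ∀ (b : Int),
    balList b cs = (List.range cs.length).map (fun k => b + prefBal cs (k + 1)) := by
  induction cs with
  | nil => intro b; simp [balList]
  | cons c rest ih =>
    intro b
    simp only [balList, List.length_cons, List.range_succ_eq_map, List.map_cons,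
      List.map_map, ih, List.cons_eq_cons]
    have h0 : prefBal rest 0 = 0 := by simp [prefBal]
    refine ⟨?_, ?_⟩
    · rw [prefBal_cons, h0]
      split_ifs <;> ring
    · apply List.map_congr_left
      intro k _
      simp only [Function.comp, Nat.succ_eq_add_one]
      rw [prefBal_cons]
      split_ifs <;> ring

theorem loop_eq (length : Nat) (hlen : 1 ≤ length) :
    ∀ (rest : List Char) (idx : Nat) (counter : Int), idx + rest.length = length →
      check_surrounded_loop length rest idx counter
        = !((balList counter rest).dropLast.contains 0) := by
  intro rest
  induction rest with
  | nil => intro idx counter _; simp [check_surrounded_loop, balList]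
  | cons c rest ih =>
    intro idx counter hidx
    rw [check_surrounded_loop]
    simp only [balList]
    set b := if c = '(' then counter + 1 else if c = ')' then counter - 1 else counter with hbdef
    cases rest with
    | nil =>
      have : idx = length - 1 := by simp at hidx; omega
      simp [this, balList, check_surrounded_loop]
    | cons r rs =>
      have hne : idx ≠ length - 1 := by simp at hidx; omega
      have hrec := ih (idx + 1) b (by simp at hidx ⊢; omega)
      have hbl : balList b (r :: rs) ≠ [] := by simp [balList]
      rw [List.dropLast_cons_of_ne_nil hbl]
      by_cases h0 : b = 0 <;> simp [h0, hne, hrec]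
      exact fun _ h' => h0 h'.symm

theorem dropLast_map_range {α : Type} (g : Nat → α) (n : Nat) (h : 1 ≤ n) :
    ((List.range n).map g).dropLast = (List.range (n - 1)).map g := by
  obtain ⟨m, rfl⟩ : ∃ m, n = m + 1 := ⟨n - 1, by omega⟩
  rw [List.range_succ, List.map_append]
  simp

theorem all_congr_mem {α : Type} (l : List α) (p q : α → Bool) (h : ∀ x ∈ l, p x = q x) :
    l.all p = l.all q := by
  induction l with
  | nil => rfl
  | cons a t ih => simp only [List.all_cons, h a (by simp), ih fun x hx => h x (by simp [hx])]

-- ===== VERDICT (by name: the statement is the Claim_ definition above) =====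
theorem check_surrounded_spec : Claim_equal_check_surrounded := by
  intro s _
  unfold Spec_check_surrounded check_surrounded check_surrounded_alt
  dsimp only
  by_cases h : s.toList.length ≤ 1
  · rw [if_pos h, if_pos h]
  · rw [if_neg h, if_neg h,
      loop_eq _ (by omega) _ 0 0 (by omega),
      balList_eq_map, dropLast_map_range _ _ (by omega),
      PySem.List.pyRange_one]
    have hn : ((s.toList.length : Int) - 1).toNat = s.toList.length - 1 := by omega
    rw [hn, List.contains_eq_any_beq, List.not_any_eq_all_not, List.all_map, List.all_map]
    apply all_congr_mem
    intro k _
    simp only [Function.comp]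
    rw [show PySem.List.slice s.toList none (some (1 + (k : Int)))
          = s.toList.take ((1 : Int) + k).toNat from PySem.List.slice_to _ (by omega)]
    have ht : ((1 : Int) + k).toNat = k + 1 := by omega
    rw [ht]
    by_cases hc : (s.toList.take (k + 1)).count '(' = (s.toList.take (k + 1)).count ')'
    · simp [prefBal, hc]
    · have hne' : ¬ (0 : Int) = prefBal s.toList (k + 1) := by
        simp only [prefBal]
        omega
      simp [hne', hc]
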